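-- pv_equiv track=rewrite | github.com/miliar/Code_Jam_Webscraper | solutions_python/solutions_year15_round0_nr1/2819.py | solve
-- ===== SOURCE A (Python) =====
-- def solve(S):
--     N = 0
--     ans = 0
--     for i, s in enumerate(S):
--         if N < i:
--             ans += i - N
--             N = i
--         N += s
--     return ans
-- ===== SOURCE B (Python) =====
-- def solve(S):
--     # Staged computation: build all prefix sums, then take the largest deficit.
--     prefixes = [0]
--     for s in S:
--         prefixes.append(prefixes[-1] + s)
--     deficits = [i - p for i, p in enumerate(prefixes[:-1])]
--     return max([0] + deficits)
-- ===== Notes on version B (the rewrite author's own statement) =====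
-- stated objective: alternative
-- what changed: B replaces A's single stateful loop (which snaps the running count up and accumulates increments) with three staged passes: materialise the list of prefix sums, map it to the deficit list i - prefix_i, and take the maximum deficit clamped below at zero -- the closed form max(0, max_i (i - sum(S[:i]))).
import Mathlib
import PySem

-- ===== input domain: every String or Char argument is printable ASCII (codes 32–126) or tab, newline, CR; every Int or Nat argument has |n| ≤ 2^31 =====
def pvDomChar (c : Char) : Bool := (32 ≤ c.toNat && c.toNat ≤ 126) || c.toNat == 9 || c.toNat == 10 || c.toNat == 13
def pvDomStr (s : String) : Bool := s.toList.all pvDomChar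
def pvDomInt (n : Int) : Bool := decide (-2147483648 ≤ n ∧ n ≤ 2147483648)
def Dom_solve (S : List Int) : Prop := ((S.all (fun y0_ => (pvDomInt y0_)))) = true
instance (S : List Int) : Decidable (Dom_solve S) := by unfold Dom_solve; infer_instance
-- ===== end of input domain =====

-- B trades A's single stateful snap-up loop for staged passes (prefix sums, deficit list, max); alternative decomposition, same cost.

-- ===== PORT A =====
-- A's loop: state (N, ans); if N < i then ans += i - N and N is snapped up to i; then N += s.
def solveGo (S : List Int) (i N ans : Int) : Int :=
  match S with
  | [] => ans
  | s :: t =>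
    if N < i then solveGo t (i + 1) (i + s) (ans + (i - N))
    else solveGo t (i + 1) (N + s) ans

def solve (S : List Int) : Int := solveGo S 0 0 0

-- ===== PORT B =====
-- prefixes[:-1] of Source B: the prefix sums acc, acc+s0, acc+s0+s1, …, one per element of S.
def pvPrefixes (S : List Int) (acc : Int) : List Int :=
  match S with
  | [] => []
  | s :: t => acc :: pvPrefixes t (acc + s)

-- Source B: deficits = [i - p for i, p in enumerate(prefixes[:-1])]; return max([0] + deficits)
-- (Python's max over the nonempty list [0]+deficits is exactly the fold of max with head 0.)
def solve_alt (S : List Int) : Int :=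
  let deficits := ((pvPrefixes S 0).zipIdx).map (fun pi => (pi.2 : Int) - pi.1)
  deficits.foldl max 0

-- ===== PRECONDITION & SPEC =====
def Spec_solve (S : List Int) (out : Int) : Prop := out = solve_alt S
instance (S : List Int) (out : Int) : Decidable (Spec_solve S out) := by unfold Spec_solve; infer_instance

-- ===== CLAIM (what is proved, stated in full; the proofs are below) =====
def Claim_equal_solve : Prop := ∀ (S : List Int), Dom_solve S → Spec_solve S (solve S)

-- ===== LEMMAS AND PROOFS =====

-- Invariant: A's counter N equals (prefix sum) + (deficit accumulated so far), and the rest of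
-- A's loop computes the fold of max over the remaining deficits.
theorem solveGo_eq_fold (S : List Int) : ∀ (k : Nat) (run ans : Int),
    solveGo S (k : Int) (run + ans) ans
      = (((pvPrefixes S run).zipIdx k).map (fun pi => (pi.2 : Int) - pi.1)).foldl max ans := by
  induction S with
  | nil => intro k run ans; rfl
  | cons s t ih =>
    intro k run ans
    simp only [solveGo, pvPrefixes, List.zipIdx, List.map, List.foldl]
    by_cases h : run + ans < (k : Int)
    · rw [if_pos h]
      have hmax : max ans ((k : Int) - run) = (k : Int) - run := by omega
      rw [hmax]
      have := ih (k + 1) (run + s) ((k : Int) - run)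
      have h1 : ((k : Int) + 1) = (((k + 1 : Nat)) : Int) := by push_cast; ring
      have h2 : ans + ((k : Int) - (run + ans)) = (k : Int) - run := by ring
      have h3 : (k : Int) + s = run + s + ((k : Int) - run) := by ring
      rw [h1, h2, h3, this]
    · rw [if_neg h]
      have hmax : max ans ((k : Int) - run) = ans := by omega
      rw [hmax]
      have := ih (k + 1) (run + s) ans
      have h1 : ((k : Int) + 1) = (((k + 1 : Nat)) : Int) := by push_cast; ring
      have h3 : run + ans + s = run + s + ans := by ring
      rw [h1, h3, this]

-- ===== VERDICT (by name: the statement is the Claim_ definition above) =====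
theorem solve_spec : Claim_equal_solve := by
  intro S _
  unfold Spec_solve solve solve_alt
  have := solveGo_eq_fold S 0 0 0
  simpa using this
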